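-- pv_equiv track=rewrite | github.com/kodareef5/sha256-probe | headline_hunt/bets/math_principles/encoders/smoke_bridge_cubes.py | verdict
-- ===== SOURCE A (Python) =====
-- from typing import Any
--
-- def verdict(payload: dict[str, Any]) -> tuple[str, str]:
--     statuses = {row["status"] for row in payload["runs"]}
--     if "UNSATISFIABLE" in statuses:
--         return (
--             "bridge_cube_smoke_found_unsat_cube",
--             "Promote UNSAT bridge cubes to proof/log extraction.",
--         )
--     if "SATISFIABLE" in statuses:
--         return (
--             "bridge_cube_smoke_found_sat_cube",
--             "Inspect SAT bridge cube witnesses for structural relevance.",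
--         )
--     return (
--         "bridge_cube_smoke_all_unknown",
--         "No cube resolves at the smoke cap; compare conflict/decision signatures before deeper runs.",
--     )
-- ===== SOURCE B (Python) =====
-- _OUTCOMES = [
--     (
--         "bridge_cube_smoke_all_unknown",
--         "No cube resolves at the smoke cap; compare conflict/decision signatures before deeper runs.",
--     ),
--     (
--         "bridge_cube_smoke_found_sat_cube",
--         "Inspect SAT bridge cube witnesses for structural relevance.",
--     ),
--     (
--         "bridge_cube_smoke_found_unsat_cube",
--         "Promote UNSAT bridge cubes to proof/log extraction.",
--     ),
-- ]
--
-- _RANK = {"SATISFIABLE": 1, "UNSATISFIABLE": 2}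
--
--
-- def verdict(payload):
--     sev = 0
--     for row in payload["runs"]:
--         r = _RANK.get(row["status"], 0)
--         if r > sev:
--             sev = r
--     return _OUTCOMES[sev]
-- ===== Notes on version B (the rewrite author's own statement) =====
-- stated objective: alternative
-- what changed: Replaces building a set of statuses and testing two memberships with a single pass that folds a numeric severity rank (UNSAT=2, SAT=1, other=0) to its maximum and indexes an outcome table, so the priority order is encoded arithmetically rather than by an if-chain over set membership.
import Mathlib
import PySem

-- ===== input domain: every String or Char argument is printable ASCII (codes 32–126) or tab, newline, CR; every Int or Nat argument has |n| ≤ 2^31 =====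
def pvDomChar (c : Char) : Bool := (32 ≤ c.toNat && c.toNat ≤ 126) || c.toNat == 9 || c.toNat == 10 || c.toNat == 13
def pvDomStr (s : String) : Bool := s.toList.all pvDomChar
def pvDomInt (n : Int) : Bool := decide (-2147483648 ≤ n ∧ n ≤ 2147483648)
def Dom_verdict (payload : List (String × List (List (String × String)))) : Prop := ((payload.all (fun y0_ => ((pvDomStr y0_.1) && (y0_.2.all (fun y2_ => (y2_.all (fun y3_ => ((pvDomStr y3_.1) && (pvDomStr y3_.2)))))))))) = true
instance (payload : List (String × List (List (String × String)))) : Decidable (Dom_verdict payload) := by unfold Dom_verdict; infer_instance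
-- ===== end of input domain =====

-- B replaces the status-set + membership if-chain by one pass folding a numeric severity rank to its maximum and indexing an outcome table (alternative decomposition; same cost).

-- ===== PORT A =====
-- statuses = {row["status"] for row in payload["runs"]}; getD "" is reached only outside Pre_verdict (KeyError in Python).
def verdict (payload : List (String × List (List (String × String)))) : String × String :=
  let runs := ((PySem.Dict.mk payload).get? "runs").getD []
  let statuses : PySem.Set String :=
    PySem.Set.ofList (runs.map (fun row => ((PySem.Dict.mk row).getD "status" "")))
  if PySem.Set.contains statuses "UNSATISFIABLE" then
    ("bridge_cube_smoke_found_unsat_cube",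
     "Promote UNSAT bridge cubes to proof/log extraction.")
  else if PySem.Set.contains statuses "SATISFIABLE" then
    ("bridge_cube_smoke_found_sat_cube",
     "Inspect SAT bridge cube witnesses for structural relevance.")
  else
    ("bridge_cube_smoke_all_unknown",
     "No cube resolves at the smoke cap; compare conflict/decision signatures before deeper runs.")

-- ===== PORT B =====
-- module-level tables of Source B
def pvOutcomes : List (String × String) :=
  [("bridge_cube_smoke_all_unknown",
    "No cube resolves at the smoke cap; compare conflict/decision signatures before deeper runs."),
   ("bridge_cube_smoke_found_sat_cube",
    "Inspect SAT bridge cube witnesses for structural relevance."),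
   ("bridge_cube_smoke_found_unsat_cube",
    "Promote UNSAT bridge cubes to proof/log extraction.")]

def pvRank : PySem.Dict String Int :=
  PySem.Dict.mk [("SATISFIABLE", 1), ("UNSATISFIABLE", 2)]

-- one pass: fold the maximum severity rank, then index the table (the .getD ("","") default is unreachable: sev ∈ {0,1,2})
def verdict_alt (payload : List (String × List (List (String × String)))) : String × String :=
  let runs := ((PySem.Dict.mk payload).get? "runs").getD []
  let sev : Int := runs.foldl
    (fun sev row =>
      let r := pvRank.getD ((PySem.Dict.mk row).getD "status" "") 0
      if r > sev then r else sev) 0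
  (PySem.List.pyGet? pvOutcomes sev).getD ("", "")

-- ===== PRECONDITION & SPEC =====
-- Pre_ excludes exactly the inputs where Python A raises KeyError: payload lacking a "runs" key,
-- or some run row lacking a "status" key.
def Pre_verdict (payload : List (String × List (List (String × String)))) : Prop :=
  (PySem.Dict.mk payload).contains "runs" = true ∧
  ∀ row ∈ ((PySem.Dict.mk payload).get? "runs").getD [], (PySem.Dict.mk row).contains "status" = true
instance (payload : List (String × List (List (String × String)))) : Decidable (Pre_verdict payload) := by unfold Pre_verdict; infer_instance

def pvWitness_verdict : (List (String × List (List (String × String)))) :=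
  [("runs", [[("status", "SATISFIABLE")], [("status", "UNKNOWN")]])]

def Spec_verdict (payload : List (String × List (List (String × String)))) (out : String × String) : Prop := out = verdict_alt payload
instance (payload : List (String × List (List (String × String)))) (out : String × String) : Decidable (Spec_verdict payload out) := by unfold Spec_verdict; infer_instance

-- ===== CLAIM (what is proved, stated in full; the proofs are below) =====
def Claim_equal_verdict : Prop := ∀ (payload : List (String × List (List (String × String)))), Dom_verdict payload → Pre_verdict payload → Spec_verdict payload (verdict payload)

-- ===== LEMMAS AND PROOFS =====

def pvRankRow (row : List (String × String)) : Int :=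
  pvRank.getD ((PySem.Dict.mk row).getD "status" "") 0

def pvStep : Int → List (String × String) → Int :=
  fun sev row => let r := pvRankRow row; if r > sev then r else sev

theorem pvStep_eq_max (sev : Int) (row : List (String × String)) :
    pvStep sev row = max sev (pvRankRow row) := by
  unfold pvStep
  dsimp only
  split_ifs with h <;> omega

theorem pvRank_getD (s : String) :
    pvRank.getD s 0 = (if s = "UNSATISFIABLE" then 2 else if s = "SATISFIABLE" then 1 else 0) := by
  by_cases h1 : s = "UNSATISFIABLE"
  · simp [pvRank, PySem.Dict.getD, PySem.Dict.get?, List.find?, h1]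
  · by_cases h2 : s = "SATISFIABLE"
    · simp [pvRank, PySem.Dict.getD, PySem.Dict.get?, h2]
    · have b1 : ("UNSATISFIABLE" == s) = false := beq_eq_false_iff_ne.mpr (Ne.symm h1)
      have b2 : ("SATISFIABLE" == s) = false := beq_eq_false_iff_ne.mpr (Ne.symm h2)
      simp [pvRank, PySem.Dict.getD, PySem.Dict.get?, List.find?, b1, b2, h1, h2]

theorem pvRankRow_eq (row : List (String × String)) :
    pvRankRow row =
      (if ((PySem.Dict.mk row).getD "status" "") = "UNSATISFIABLE" then 2
       else if ((PySem.Dict.mk row).getD "status" "") = "SATISFIABLE" then 1 else 0) := by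
  unfold pvRankRow
  rw [pvRank_getD]

theorem pvRankRow_nonneg (row : List (String × String)) : 0 ≤ pvRankRow row := by
  rw [pvRankRow_eq]; split_ifs <;> norm_num

theorem foldl_pvStep_acc (runs : List (List (String × String))) (acc : Int)
    (hacc : 0 ≤ acc) :
    runs.foldl pvStep acc = max acc (runs.foldl pvStep 0) := by
  induction runs generalizing acc with
  | nil => simp [List.foldl]; omega
  | cons r rs ih =>
    simp only [List.foldl_cons]
    have hr := pvRankRow_nonneg r
    rw [ih (pvStep acc r) (by rw [pvStep_eq_max]; omega),
        ih (pvStep 0 r) (by rw [pvStep_eq_max]; omega), pvStep_eq_max, pvStep_eq_max]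
    omega

-- the folded maximum rank expressed through A's two membership tests
theorem foldl_pvStep_eq (runs : List (List (String × String))) :
    runs.foldl pvStep 0 =
      (if runs.any (fun row => ((PySem.Dict.mk row).getD "status" "") == "UNSATISFIABLE") then 2
       else if runs.any (fun row => ((PySem.Dict.mk row).getD "status" "") == "SATISFIABLE") then 1
       else 0) := by
  induction runs with
  | nil => simp [List.foldl]
  | cons r rs ih =>
    simp only [List.foldl_cons, List.any_cons]
    have hr := pvRankRow_nonneg r
    rw [foldl_pvStep_acc rs (pvStep 0 r) (by rw [pvStep_eq_max]; omega), ih,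
        pvStep_eq_max, pvRankRow_eq]
    split_ifs <;> simp_all <;> first | omega | tauto

-- set-membership in the comprehension's set = an any over the rows
theorem contains_statuses_eq_any (runs : List (List (String × String))) (s : String) :
    PySem.Set.contains (PySem.Set.ofList (runs.map (fun row => ((PySem.Dict.mk row).getD "status" "")))) s
      = runs.any (fun row => ((PySem.Dict.mk row).getD "status" "") == s) := by
  rw [Bool.eq_iff_iff]
  simp only [PySem.Set.contains_iff, PySem.Set.mem_ofList, List.mem_map, List.any_eq_true,
    beq_iff_eq]

-- ===== VERDICT (by name: the statement is the Claim_ definition above) =====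
theorem verdict_spec : Claim_equal_verdict := by
  intro payload _ _
  show verdict payload = verdict_alt payload
  unfold verdict verdict_alt
  simp only [contains_statuses_eq_any]
  rw [show (fun (sev : Int) (row : List (String × String)) =>
        let r := pvRank.getD ((PySem.Dict.mk row).getD "status" "") 0
        if r > sev then r else sev) = pvStep from rfl]
  rw [foldl_pvStep_eq]
  split_ifs <;> simp [pvOutcomes, PySem.List.pyGet?, PySem.List.pyIdx?]
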